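-- pv_equiv track=rewrite | github.com/id-b3/AirFlow-ImaLife | run_scripts/phantom_scripts/python/common/functionutil_ivacaftor.py | remove_exclude_cases_from_subjects_info
-- ===== SOURCE A (Python) =====
-- def remove_exclude_cases_from_subjects_info(in_subjects_info, in_cases_exclude):
--     subjects_casesID = list(in_subjects_info.values())[0]
--
--     for icase in in_cases_exclude:
--         if icase in subjects_casesID:
--             index_case = subjects_casesID.index(icase)
--             for ifield, data_field in in_subjects_info.items():
--                 data_field.pop(index_case)
--
--     return in_subjects_info
-- ===== SOURCE B (Python) =====
-- def remove_exclude_cases_from_subjects_info(in_subjects_info, in_cases_exclude):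
--     ref = list(in_subjects_info.values())[0]
--     removed = set()
--     for case in in_cases_exclude:
--         for i, v in enumerate(ref):
--             if v == case and i not in removed:
--                 removed.add(i)
--                 break
--     for field in in_subjects_info.values():
--         field[:] = [x for i, x in enumerate(field) if i not in removed]
--     return in_subjects_info
-- ===== Notes on version B (the rewrite author's own statement) =====
-- stated objective: alternative
-- what changed: Instead of popping an index out of every field list for each exclude, B builds a set of removed positions in one pass over the first field (first not-yet-removed occurrence per exclude) and then filters each field once by that index set; Pre_ excludes the empty dict (A raises IndexError) and dicts where some field is shorter than the first while an exclude occurs in the first field, where A's pop can raise IndexError mid-loop (on those shapes A sometimes still returns, and B agrees there).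
-- outside the precondition, e.g. on remove_exclude_cases_from_subjects_info({'a': ['x', 'y'], 'b': ['x']}, ['y']): A raises IndexError, B returns {'a': ['x'], 'b': ['x']}
import Mathlib
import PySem

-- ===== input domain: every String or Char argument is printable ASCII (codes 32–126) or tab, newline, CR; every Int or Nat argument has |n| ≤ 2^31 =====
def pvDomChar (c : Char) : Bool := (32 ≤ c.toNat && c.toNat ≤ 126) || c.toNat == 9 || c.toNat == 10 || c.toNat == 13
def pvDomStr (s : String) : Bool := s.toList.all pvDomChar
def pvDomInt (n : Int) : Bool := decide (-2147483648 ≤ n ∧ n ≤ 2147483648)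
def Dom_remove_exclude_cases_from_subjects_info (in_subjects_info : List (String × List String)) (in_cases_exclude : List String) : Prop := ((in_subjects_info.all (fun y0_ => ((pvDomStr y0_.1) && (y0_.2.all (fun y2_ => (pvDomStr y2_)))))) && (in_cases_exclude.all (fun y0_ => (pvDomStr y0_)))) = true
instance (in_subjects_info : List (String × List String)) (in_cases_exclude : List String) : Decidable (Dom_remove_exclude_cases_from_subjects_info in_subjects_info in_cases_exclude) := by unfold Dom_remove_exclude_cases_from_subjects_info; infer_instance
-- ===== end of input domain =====

-- B replaces A's repeated membership/index/pop passes over every field by one pass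
-- building a set of removed positions, then a single index-filter per field
-- (alternative decomposition; same return value). Python A and B mutate the field
-- lists in place; the equivalence proved here is about the returned value.

-- ===== PORT A =====
-- one iteration of A's 'for icase in in_cases_exclude' loop (state = the dict)
def pvAStep (st : List (String × List String)) (icase : String) : List (String × List String) :=
  let subjects_casesID := (st.headD ("", [])).2   -- list(in_subjects_info.values())[0]; Pre_ excludes the empty dict
  if subjects_casesID.contains icase then
    let index_case := (PySem.List.index? subjects_casesID icase).getD 0
    st.map (fun p => (p.1, ((PySem.List.pop? p.2 (index_case : Int)).map Prod.snd).getD p.2))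
      -- data_field.pop(index_case); Pre_ excludes the inputs where this raises IndexError
  else st

def remove_exclude_cases_from_subjects_info (in_subjects_info : List (String × List String)) (in_cases_exclude : List String) : List (String × List String) :=
  in_cases_exclude.foldl pvAStep in_subjects_info

-- ===== PORT B =====
-- Source B's inner loop: 'for i, v in enumerate(ref): if v == case and i not in removed: removed.add(i); break'
def pvAddFirst (c : String) : List (Int × String) → PySem.Set Int → PySem.Set Int
  | [], rem => rem
  | (i, v) :: rest, rem =>
      if v = c ∧ PySem.Set.contains rem i = false then PySem.Set.add rem i
      else pvAddFirst c rest rem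

-- Source B's comprehension '[x for i, x in enumerate(field) if i not in removed]'
def pvKeep (rem : PySem.Set Int) : List (Int × String) → List String
  | [] => []
  | (i, x) :: rest => if PySem.Set.contains rem i then pvKeep rem rest else x :: pvKeep rem rest

def remove_exclude_cases_from_subjects_info_alt (in_subjects_info : List (String × List String)) (in_cases_exclude : List String) : List (String × List String) :=
  let ref := (in_subjects_info.headD ("", [])).2
  let removed := in_cases_exclude.foldl
    (fun rem c => pvAddFirst c (PySem.List.enumerate ref 0) rem) PySem.Set.empty
  in_subjects_info.map (fun p => (p.1, pvKeep removed (PySem.List.enumerate p.2 0)))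

-- ===== PRECONDITION & SPEC =====
-- Pre_ excludes the empty dict (A raises IndexError on line 1) and dicts whose first
-- field list is longer than some other field list while an exclude occurs in the first
-- field, on which A's data_field.pop can raise IndexError mid-loop; this is slightly
-- narrower than A's exact no-raise set (a shorter field raises only when some exclude
-- matches at a high enough index), stated in the claim.
def Pre_remove_exclude_cases_from_subjects_info (in_subjects_info : List (String × List String)) (in_cases_exclude : List String) : Prop :=
  in_subjects_info ≠ [] ∧
  ((∀ p ∈ in_subjects_info, (in_subjects_info.headD ("", [])).2.length ≤ p.2.length) ∨
    (∀ c ∈ in_cases_exclude, c ∉ (in_subjects_info.headD ("", [])).2))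

instance (in_subjects_info : List (String × List String)) (in_cases_exclude : List String) : Decidable (Pre_remove_exclude_cases_from_subjects_info in_subjects_info in_cases_exclude) := by unfold Pre_remove_exclude_cases_from_subjects_info; infer_instance

def pvWitness_remove_exclude_cases_from_subjects_info : (List (String × List String)) × List String :=
  ([("id", ["s1", "s2", "s3"]), ("age", ["10", "20", "30"])], ["s2", "s9"])

def Spec_remove_exclude_cases_from_subjects_info (in_subjects_info : List (String × List String)) (in_cases_exclude : List String) (out : List (String × List String)) : Prop := out = remove_exclude_cases_from_subjects_info_alt in_subjects_info in_cases_exclude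
instance (in_subjects_info : List (String × List String)) (in_cases_exclude : List String) (out : List (String × List String)) : Decidable (Spec_remove_exclude_cases_from_subjects_info in_subjects_info in_cases_exclude out) := by unfold Spec_remove_exclude_cases_from_subjects_info; infer_instance

-- ===== CLAIM (what is proved, stated in full; the proofs are below) =====
def Claim_equal_remove_exclude_cases_from_subjects_info : Prop := ∀ (in_subjects_info : List (String × List String)) (in_cases_exclude : List String), Dom_remove_exclude_cases_from_subjects_info in_subjects_info in_cases_exclude → Pre_remove_exclude_cases_from_subjects_info in_subjects_info in_cases_exclude → Spec_remove_exclude_cases_from_subjects_info in_subjects_info in_cases_exclude (remove_exclude_cases_from_subjects_info in_subjects_info in_cases_exclude)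

-- ===== LEMMAS AND PROOFS =====

-- proof-only abstraction: a "marks" list pairing each reference value with a removed flag
def pvMarkOne (c : String) : List (String × Bool) → List (String × Bool)
  | [] => []
  | (v, r) :: ms => if v = c ∧ r = false then (v, true) :: ms else (v, r) :: pvMarkOne c ms

def pvFilt (field : List String) (marks : List (String × Bool)) : List String :=
  ((field.zip marks).filterMap fun x => if x.2.2 then none else some x.1) ++ field.drop marks.length

-- the marks list induced by a removed-index set on an enumerated reference list
def pvMarksOf (rem : PySem.Set Int) : List (Int × String) → List (String × Bool)
  | [] => []
  | (i, v) :: rest => (v, PySem.Set.contains rem i) :: pvMarksOf rem rest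

def pvUnmasked (marks : List (String × Bool)) : List String :=
  marks.filterMap fun x => if x.2 then none else some x.1

theorem pvContains_eq (t : PySem.Set Int) (x : Int) : PySem.Set.contains t x = decide (x ∈ t) := by
  by_cases h : x ∈ t
  · simp [h]
  · simp only [h, decide_false]
    by_contra hb
    exact h ((PySem.Set.contains_iff t x).mp (by revert hb; cases PySem.Set.contains t x <;> simp))

theorem pvMarksOf_cons (rem : PySem.Set Int) (i : Int) (v : String) (rest : List (Int × String)) :
    pvMarksOf rem ((i, v) :: rest) = (v, PySem.Set.contains rem i) :: pvMarksOf rem rest := rfl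

theorem pvKeep_cons (rem : PySem.Set Int) (i : Int) (x : String) (rest : List (Int × String)) :
    pvKeep rem ((i, x) :: rest)
      = if PySem.Set.contains rem i then pvKeep rem rest else x :: pvKeep rem rest := rfl

theorem pvAddFirst_cons (c : String) (i : Int) (v : String) (rest : List (Int × String)) (rem : PySem.Set Int) :
    pvAddFirst c ((i, v) :: rest) rem
      = if v = c ∧ PySem.Set.contains rem i = false then PySem.Set.add rem i
        else pvAddFirst c rest rem := rfl

theorem pvFilt_cons (x : String) (xs : List String) (w : String) (r : Bool) (ms : List (String × Bool)) :
    pvFilt (x :: xs) ((w, r) :: ms) = if r then pvFilt xs ms else x :: pvFilt xs ms := by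
  cases r <;> simp [pvFilt]

theorem pvFilt_self (marks : List (String × Bool)) :
    pvFilt (marks.map Prod.fst) marks = pvUnmasked marks := by
  induction marks with
  | nil => simp [pvFilt, pvUnmasked]
  | cons m ms ih =>
    obtain ⟨w, r⟩ := m
    simp [pvFilt_cons, pvUnmasked, List.filterMap_cons] at *
    cases r <;> simp [ih]

theorem pvUnmasked_cons_true (w : String) (ms : List (String × Bool)) :
    pvUnmasked ((w, true) :: ms) = pvUnmasked ms := by simp [pvUnmasked]

theorem pvUnmasked_cons_false (w : String) (ms : List (String × Bool)) :
    pvUnmasked ((w, false) :: ms) = w :: pvUnmasked ms := by simp [pvUnmasked]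

theorem pvFilt_cons_true (x : String) (xs : List String) (w : String) (ms : List (String × Bool)) :
    pvFilt (x :: xs) ((w, true) :: ms) = pvFilt xs ms := by simp [pvFilt_cons]

theorem pvFilt_cons_false (x : String) (xs : List String) (w : String) (ms : List (String × Bool)) :
    pvFilt (x :: xs) ((w, false) :: ms) = x :: pvFilt xs ms := by simp [pvFilt_cons]

theorem pvMarkOne_cons_true (c w : String) (ms : List (String × Bool)) :
    pvMarkOne c ((w, true) :: ms) = (w, true) :: pvMarkOne c ms := by simp [pvMarkOne]

theorem pvMarkOne_cons_false_self (c : String) (ms : List (String × Bool)) :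
    pvMarkOne c ((c, false) :: ms) = (c, true) :: ms := by simp [pvMarkOne]

theorem pvMarkOne_cons_false_ne (c w : String) (h : w ≠ c) (ms : List (String × Bool)) :
    pvMarkOne c ((w, false) :: ms) = (w, false) :: pvMarkOne c ms := by simp [pvMarkOne, h]

theorem pvMarkOne_of_not_mem (c : String) (marks : List (String × Bool))
    (h : c ∉ pvUnmasked marks) : pvMarkOne c marks = marks := by
  induction marks with
  | nil => rfl
  | cons m ms ih =>
    obtain ⟨w, r⟩ := m
    cases r with
    | true =>
      rw [pvUnmasked_cons_true] at h
      rw [pvMarkOne_cons_true, ih h]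
    | false =>
      rw [pvUnmasked_cons_false] at h
      simp at h
      have hw : w ≠ c := fun e => h.1 e.symm
      rw [pvMarkOne_cons_false_ne c w hw, ih h.2]

theorem pvMarkOne_fst (c : String) (marks : List (String × Bool)) :
    (pvMarkOne c marks).map Prod.fst = marks.map Prod.fst := by
  induction marks with
  | nil => rfl
  | cons m ms ih =>
    obtain ⟨w, r⟩ := m
    by_cases h : w = c ∧ r = false <;> simp [pvMarkOne, h, ih]

theorem pvMarkOne_length (c : String) (marks : List (String × Bool)) :
    (pvMarkOne c marks).length = marks.length := by
  induction marks with
  | nil => rfl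
  | cons m ms ih =>
    obtain ⟨w, r⟩ := m
    by_cases h : w = c ∧ r = false <;> simp [pvMarkOne, h, ih]

theorem pvUnmasked_le_filt (marks : List (String × Bool)) (v : List String)
    (hlen : marks.length ≤ v.length) :
    (pvUnmasked marks).length ≤ (pvFilt v marks).length := by
  induction marks generalizing v with
  | nil => simp [pvUnmasked]
  | cons m ms ih =>
    obtain ⟨w, r⟩ := m
    cases v with
    | nil => simp at hlen
    | cons x xs =>
      simp at hlen
      cases r with
      | true => rw [pvUnmasked_cons_true, pvFilt_cons_true]; exact ih xs hlen
      | false =>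
        rw [pvUnmasked_cons_false, pvFilt_cons_false]
        simpa using ih xs hlen

theorem pvErase_filt (c : String) (marks : List (String × Bool)) (v : List String) (k : Nat)
    (hlen : marks.length ≤ v.length)
    (hidx : PySem.List.index? (pvUnmasked marks) c = some k) :
    (pvFilt v marks).eraseIdx k = pvFilt v (pvMarkOne c marks) := by
  induction marks generalizing v k with
  | nil => simp [pvUnmasked, PySem.List.index?_eq_idxOf?] at hidx
  | cons m ms ih =>
    obtain ⟨w, r⟩ := m
    cases v with
    | nil => simp at hlen
    | cons x xs =>
      simp at hlen
      cases r with
      | true =>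
        rw [pvUnmasked_cons_true] at hidx
        rw [pvFilt_cons_true, pvMarkOne_cons_true, pvFilt_cons_true]
        exact ih xs k hlen hidx
      | false =>
        rw [pvUnmasked_cons_false] at hidx
        by_cases hw : w = c
        · subst hw
          rw [PySem.List.index?_cons_self] at hidx
          injection hidx with hk
          subst hk
          rw [pvFilt_cons_false, pvMarkOne_cons_false_self, pvFilt_cons_true]
          rfl
        · rw [PySem.List.index?_cons_of_ne _ hw] at hidx
          obtain ⟨k', hk', hkk⟩ := Option.map_eq_some_iff.mp hidx
          subst hkk
          rw [pvFilt_cons_false, pvMarkOne_cons_false_ne c w hw, pvFilt_cons_false,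
            List.eraseIdx_cons_succ, ih xs k' hlen hk']

theorem pvPop_filt (c : String) (marks : List (String × Bool)) (v : List String) (k : Nat)
    (hlen : marks.length ≤ v.length)
    (hidx : PySem.List.index? (pvUnmasked marks) c = some k) :
    ((PySem.List.pop? (pvFilt v marks) (k : Int)).map Prod.snd).getD (pvFilt v marks)
      = pvFilt v (pvMarkOne c marks) := by
  have hk : k < (pvUnmasked marks).length := by
    obtain ⟨hlt, -, -⟩ := PySem.List.getElem_of_index?_eq_some hidx
    exact hlt
  have hk2 : k < (pvFilt v marks).length := lt_of_lt_of_le hk (pvUnmasked_le_filt marks v hlen)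
  rw [PySem.List.pop?_natCast _ _ hk2]
  simpa using pvErase_filt c marks v k hlen hidx

theorem pvStep_map (c : String) (marks : List (String × Bool)) (info : List (String × List String))
    (hne : info ≠ [])
    (hfst : marks.map Prod.fst = (info.headD ("", [])).2)
    (hlen : ∀ p ∈ info, marks.length ≤ p.2.length) :
    pvAStep (info.map (fun p => (p.1, pvFilt p.2 marks))) c
      = info.map (fun p => (p.1, pvFilt p.2 (pvMarkOne c marks))) := by
  obtain ⟨p0, rest, rfl⟩ : ∃ p0 rest, info = p0 :: rest := by
    cases info with
    | nil => exact absurd rfl hne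
    | cons a l => exact ⟨a, l, rfl⟩
  have hcases : ((List.map (fun p => (p.1, pvFilt p.2 marks)) (p0 :: rest)).headD ("", [])).2
      = pvUnmasked marks := by
    simp only [List.map_cons, List.headD_cons]
    have : p0.2 = marks.map Prod.fst := by simpa using hfst.symm
    rw [this, pvFilt_self]
  unfold pvAStep
  rw [hcases]
  by_cases hc : c ∈ pvUnmasked marks
  · rw [if_pos (by simpa using hc)]
    obtain ⟨k, hk⟩ := Option.isSome_iff_exists.mp
      ((PySem.List.index?_isSome_iff _ _).mpr hc)
    rw [hk]
    simp only [Option.getD_some, List.map_map]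
    apply List.map_congr_left
    intro p hp
    simp only [Function.comp]
    exact congrArg (fun l => (p.1, l)) (pvPop_filt c marks p.2 k (hlen p hp) hk)
  · rw [if_neg (by simpa using hc)]
    rw [pvMarkOne_of_not_mem c marks hc]

theorem pvMain (excl : List String) (marks : List (String × Bool)) (info : List (String × List String))
    (hne : info ≠ [])
    (hfst : marks.map Prod.fst = (info.headD ("", [])).2)
    (hlen : ∀ p ∈ info, marks.length ≤ p.2.length) :
    List.foldl pvAStep (info.map (fun p => (p.1, pvFilt p.2 marks))) excl
      = info.map (fun p => (p.1, pvFilt p.2 (excl.foldl (fun m c => pvMarkOne c m) marks))) := by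
  induction excl generalizing marks with
  | nil => rfl
  | cons c cs ih =>
    rw [List.foldl_cons, pvStep_map c marks info hne hfst hlen, List.foldl_cons]
    exact ih (pvMarkOne c marks)
      (by rw [pvMarkOne_fst]; exact hfst)
      (fun p hp => by rw [pvMarkOne_length]; exact hlen p hp)

theorem pvFilt_all_false (ref v : List String) :
    pvFilt v (ref.map (fun w => (w, false))) = v := by
  induction ref generalizing v with
  | nil => simp [pvFilt]
  | cons a l ih =>
    cases v with
    | nil => simp [pvFilt]
    | cons x xs =>
      rw [List.map_cons, pvFilt_cons]
      simp [ih xs]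

theorem pvUnmasked_all_false (ref : List String) :
    pvUnmasked (ref.map (fun w => (w, false))) = ref := by
  induction ref with
  | nil => rfl
  | cons a l ih => rw [List.map_cons, pvUnmasked_cons_false, ih]

theorem pvAStep_of_not_mem (st : List (String × List String)) (c : String)
    (h : c ∉ (st.headD ("", [])).2) : pvAStep st c = st := by
  unfold pvAStep
  rw [if_neg (by simpa using h)]

theorem pvMarks_const (excl : List String) (ref : List String)
    (h : ∀ c ∈ excl, c ∉ ref) :
    excl.foldl (fun m c => pvMarkOne c m) (ref.map (fun w => (w, false))) = ref.map (fun w => (w, false)) := by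
  induction excl with
  | nil => rfl
  | cons c cs ih =>
    rw [List.foldl_cons, pvMarkOne_of_not_mem c _ (by rw [pvUnmasked_all_false]; exact h c (by simp)),
      ih (fun c hc => h c (by simp [hc]))]

theorem pvAFold_const (excl : List String) (info : List (String × List String))
    (h : ∀ c ∈ excl, c ∉ (info.headD ("", [])).2) :
    List.foldl pvAStep info excl = info := by
  induction excl with
  | nil => rfl
  | cons c cs ih =>
    rw [List.foldl_cons, pvAStep_of_not_mem info c (h c (by simp)),
      ih (fun c hc => h c (by simp [hc]))]

-- ===== bridge: B's removed-index set ↔ the marks abstraction =====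

theorem pvMarksOf_add_lt (rem : PySem.Set Int) (i : Int) (vs : List String) (s : Int) (h : i < s) :
    pvMarksOf (PySem.Set.add rem i) (PySem.List.enumerate vs s) = pvMarksOf rem (PySem.List.enumerate vs s) := by
  induction vs generalizing s with
  | nil => simp [PySem.List.enumerate_nil, pvMarksOf]
  | cons v tl ih =>
    rw [PySem.List.enumerate_cons, pvMarksOf_cons, pvMarksOf_cons, ih (s + 1) (by omega)]
    congr 2
    rw [pvContains_eq, pvContains_eq, decide_eq_decide, PySem.Set.mem_add]
    constructor
    · rintro (hm | rfl); exact hm; omega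
    · exact Or.inl

theorem pvMem_pvAddFirst (c : String) (e : List (Int × String)) (rem : PySem.Set Int) (j : Int)
    (hj : j ∈ pvAddFirst c e rem) : j ∈ rem ∨ ∃ p ∈ e, j = p.1 := by
  induction e generalizing rem with
  | nil => exact Or.inl hj
  | cons p tl ih =>
    obtain ⟨i, v⟩ := p
    rw [pvAddFirst_cons] at hj
    split at hj
    · rcases (PySem.Set.mem_add rem i j).mp hj with hm | rfl
      · exact Or.inl hm
      · exact Or.inr ⟨(j, v), by simp⟩
    · rcases ih rem hj with hm | ⟨q, hq, rfl⟩
      · exact Or.inl hm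
      · exact Or.inr ⟨q, by simp [hq]⟩

theorem pvAddFirst_bridge (c : String) (vs : List String) (s : Int) (rem : PySem.Set Int) :
    pvMarksOf (pvAddFirst c (PySem.List.enumerate vs s) rem) (PySem.List.enumerate vs s)
      = pvMarkOne c (pvMarksOf rem (PySem.List.enumerate vs s)) := by
  induction vs generalizing s rem with
  | nil => simp [PySem.List.enumerate_nil, pvMarksOf, pvMarkOne]
  | cons v tl ih =>
    rw [PySem.List.enumerate_cons, pvAddFirst_cons]
    conv_rhs => rw [pvMarksOf_cons]
    by_cases hcond : v = c ∧ PySem.Set.contains rem s = false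
    · rw [if_pos hcond]
      obtain ⟨rfl, hcf⟩ := hcond
      rw [pvMarksOf_cons, pvMarksOf_add_lt rem s tl (s + 1) (by omega)]
      rw [hcf, pvMarkOne_cons_false_self]
      congr 2
      rw [pvContains_eq]
      simp [PySem.Set.mem_add]
    · rw [if_neg hcond]
      rw [pvMarksOf_cons]
      have hhead : PySem.Set.contains (pvAddFirst c (PySem.List.enumerate tl (s + 1)) rem) s
          = PySem.Set.contains rem s := by
        rw [pvContains_eq, pvContains_eq]
        congr 1
        simp only [eq_iff_iff]
        constructor
        · intro hm
          rcases pvMem_pvAddFirst c _ rem s hm with h | ⟨q, hq, hqe⟩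
          · exact h
          · obtain ⟨k, hk, rfl⟩ := (PySem.List.mem_enumerate_iff tl (s + 1) q).mp hq
            rw [hqe] at *; simp only at *; omega
        · intro hm
          -- s ∈ rem stays in: membership is preserved by add
          have : ∀ (e : List (Int × String)) (r : PySem.Set Int), s ∈ r → s ∈ pvAddFirst c e r := by
            intro e
            induction e with
            | nil => intro r h; exact h
            | cons q tq ihq =>
              intro r h
              obtain ⟨i, w⟩ := q
              rw [pvAddFirst_cons]
              split
              · exact (PySem.Set.mem_add r i s).mpr (Or.inl h)
              · exact ihq r h
          exact this _ rem hm
      rw [hhead, ih (s + 1) rem]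
      -- now match pvMarkOne on the head
      cases hcb : PySem.Set.contains rem s with
      | true => rw [pvMarkOne_cons_true]
      | false =>
        have hvne : v ≠ c := fun hv => hcond ⟨hv, hcb⟩
        rw [pvMarkOne_cons_false_ne c v hvne]

theorem pvAddFirst_bound (c : String) (vs : List String) (s : Int) (rem : PySem.Set Int) (B : Int)
    (hb : s + vs.length ≤ B) (h : ∀ j ∈ rem, j < B) :
    ∀ j ∈ pvAddFirst c (PySem.List.enumerate vs s) rem, j < B := by
  intro j hj
  rcases pvMem_pvAddFirst c _ rem j hj with hm | ⟨q, hq, rfl⟩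
  · exact h j hm
  · obtain ⟨k, hk, hq2⟩ := (PySem.List.mem_enumerate_iff vs s q).mp hq
    rw [hq2]
    simp only
    omega

theorem pvKeep_all (rem : PySem.Set Int) (field : List String) (s : Int)
    (h : ∀ j ∈ rem, j < s) : pvKeep rem (PySem.List.enumerate field s) = field := by
  induction field generalizing s with
  | nil => simp [PySem.List.enumerate_nil, pvKeep]
  | cons x xs ih =>
    rw [PySem.List.enumerate_cons, pvKeep_cons]
    have hs : s ∉ rem := fun hm => absurd (h s hm) (by omega)
    rw [pvContains_eq]
    simp only [hs, decide_false, Bool.false_eq_true, if_false]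
    rw [ih (s + 1) (fun j hj => by have := h j hj; omega)]

theorem pvKeep_bridge (rem : PySem.Set Int) (ref field : List String) (s : Int)
    (h : ∀ j ∈ rem, j < s + ref.length) :
    pvKeep rem (PySem.List.enumerate field s) = pvFilt field (pvMarksOf rem (PySem.List.enumerate ref s)) := by
  induction ref generalizing field s with
  | nil =>
    rw [PySem.List.enumerate_nil]
    show pvKeep rem (PySem.List.enumerate field s) = pvFilt field []
    rw [pvKeep_all rem field s (fun j hj => by have := h j hj; simpa using this)]
    simp [pvFilt]
  | cons v vs ih =>
    cases field with
    | nil => simp [PySem.List.enumerate_nil, pvKeep, PySem.List.enumerate_cons, pvMarksOf, pvFilt]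
    | cons x xs =>
      rw [PySem.List.enumerate_cons, PySem.List.enumerate_cons, pvKeep_cons, pvMarksOf_cons, pvFilt_cons]
      have h' : ∀ j ∈ rem, j < (s + 1) + vs.length := by
        intro j hj
        have := h j hj
        simp only [List.length_cons] at this
        push_cast at this ⊢
        omega
      rw [ih xs (s + 1) h']

theorem pvMarksOf_empty (ref : List String) (s : Int) :
    pvMarksOf PySem.Set.empty (PySem.List.enumerate ref s) = ref.map (fun v => (v, false)) := by
  induction ref generalizing s with
  | nil => simp [PySem.List.enumerate_nil, pvMarksOf]
  | cons v vs ih =>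
    rw [PySem.List.enumerate_cons, pvMarksOf_cons, ih (s + 1)]
    rfl

theorem pvFold_bridge (excl : List String) (ref : List String) (rem : PySem.Set Int) :
    pvMarksOf (excl.foldl (fun r c => pvAddFirst c (PySem.List.enumerate ref 0) r) rem) (PySem.List.enumerate ref 0)
      = excl.foldl (fun m c => pvMarkOne c m) (pvMarksOf rem (PySem.List.enumerate ref 0)) := by
  induction excl generalizing rem with
  | nil => rfl
  | cons c cs ih =>
    rw [List.foldl_cons, List.foldl_cons, ih, pvAddFirst_bridge]

theorem pvFold_bound (excl : List String) (ref : List String) :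
    ∀ j ∈ excl.foldl (fun r c => pvAddFirst c (PySem.List.enumerate ref 0) r) PySem.Set.empty,
      j < (0 : Int) + ref.length := by
  have gen : ∀ (ex : List String) (rem : PySem.Set Int), (∀ j ∈ rem, j < (0 : Int) + ref.length) →
      ∀ j ∈ ex.foldl (fun r c => pvAddFirst c (PySem.List.enumerate ref 0) r) rem, j < (0 : Int) + ref.length := by
    intro ex
    induction ex with
    | nil => intro rem h; exact h
    | cons c cs ih =>
      intro rem h
      rw [List.foldl_cons]
      exact ih _ (pvAddFirst_bound c ref 0 rem _ (by omega) h)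
  exact gen excl PySem.Set.empty (by simp [PySem.Set.empty])

-- B's port equals the marks formulation
theorem pvAlt_eq_marks (info : List (String × List String)) (excl : List String) :
    remove_exclude_cases_from_subjects_info_alt info excl
      = info.map (fun p => (p.1, pvFilt p.2
          (excl.foldl (fun m c => pvMarkOne c m) (((info.headD ("", [])).2).map (fun v => (v, false)))))) := by
  unfold remove_exclude_cases_from_subjects_info_alt
  dsimp only
  apply List.map_congr_left
  intro p hp
  congr 1
  rw [pvKeep_bridge _ ((info.headD ("", [])).2) p.2 0 (pvFold_bound excl _), pvFold_bridge,
    pvMarksOf_empty]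

-- ===== VERDICT (by name: the statement is the Claim_ definition above) =====
theorem remove_exclude_cases_from_subjects_info_spec : Claim_equal_remove_exclude_cases_from_subjects_info := by
  intro info excl _ hpre
  obtain ⟨hne, hdisj⟩ := hpre
  unfold Spec_remove_exclude_cases_from_subjects_info
  rw [pvAlt_eq_marks]
  unfold remove_exclude_cases_from_subjects_info
  have h0 : info.map (fun p => (p.1, pvFilt p.2 (((info.headD ("", [])).2).map (fun v => (v, false))))) = info := by
    conv_rhs => rw [← List.map_id info]
    apply List.map_congr_left
    intro p hp
    rw [pvFilt_all_false]
    rfl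
  cases hdisj with
  | inl hlen =>
    have hfst : ((((info.headD ("", [])).2).map (fun v => (v, false))).map Prod.fst) = (info.headD ("", [])).2 := by
      rw [List.map_map]
      exact List.map_id _
    have hlen' : ∀ p ∈ info, (((info.headD ("", [])).2).map (fun v => (v, (false : Bool)))).length ≤ p.2.length := by
      intro p hp; simpa using hlen p hp
    have := pvMain excl (((info.headD ("", [])).2).map (fun v => (v, false))) info hne hfst hlen'
    rw [h0] at this
    rw [this]
  | inr hnm =>
    rw [pvAFold_const excl info hnm, pvMarks_const excl _ hnm, h0]
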